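-- pv_equiv track=rewrite | github.com/yeinshin/Algorithm | programmers/programmers_풍선터트리기.py | solution
-- ===== SOURCE A (Python) =====
-- import heapq
--
-- def solution(a):
--     answer = 1
--     min_heap = []
--
--     idx = a.index(min(a))
--     left = a[:idx]
--     right = reversed(a[idx+1:])
--
--     for v in left:
--         heapq.heappush(min_heap,v)
--         if min_heap[0] == v:
--             answer +=1
--
--     min_heap = []
--     for v in right:
--         heapq.heappush(min_heap,v)
--         if min_heap[0] == v:
--             answer +=1
--
--
--     return answer
-- ===== SOURCE B (Python) =====
-- def solution(a):
--     n = len(a)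
--     # suf[i] = minimum of a[i+1:], or None when that slice is empty
--     suf = [None] * n
--     cur = None
--     for i in range(n - 1, -1, -1):
--         suf[i] = cur
--         cur = a[i] if cur is None or a[i] < cur else cur
--     ans = 0
--     pre = None
--     for i in range(n):
--         v = a[i]
--         if pre is None or v <= pre or suf[i] is None or v <= suf[i]:
--             ans += 1
--         pre = v if pre is None or v < pre else pre
--     return ans
-- ===== Notes on version B (the rewrite author's own statement) =====
-- stated objective: faster
-- what changed: Replaces the split-at-global-min plus two heapq push loops by two linear passes: a suffix running-min table and one counting pass that marks index i when a[i] is <= the prefix minimum before i or <= the suffix minimum after i.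
-- crash fix: On the empty list A raises ValueError (min() of an empty sequence) while B returns 0. — e.g. on solution([]): A raises ValueError, B returns 0
import Mathlib
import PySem

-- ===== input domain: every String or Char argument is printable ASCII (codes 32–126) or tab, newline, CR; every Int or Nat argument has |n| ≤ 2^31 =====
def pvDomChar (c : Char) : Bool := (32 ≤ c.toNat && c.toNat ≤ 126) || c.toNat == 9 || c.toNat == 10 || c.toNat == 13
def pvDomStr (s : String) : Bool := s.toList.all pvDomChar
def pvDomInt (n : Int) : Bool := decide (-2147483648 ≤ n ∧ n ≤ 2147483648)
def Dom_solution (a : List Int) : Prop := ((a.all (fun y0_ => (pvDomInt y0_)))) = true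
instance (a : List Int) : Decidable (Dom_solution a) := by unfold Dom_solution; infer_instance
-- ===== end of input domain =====

-- B replaces the heapq split-at-global-min algorithm by two linear passes (suffix minima
-- table, then one counting pass over prefix/suffix minima); return values agree on all
-- non-empty lists; on [] A raises ValueError and B returns 0.

-- ===== PORT A =====
-- hand port of heapq.heappush (CPython _siftdown): append at the end, then move the new
-- item up while it is < its parent; exact step-for-step model of the library routine
def pvSiftdown (h : List Int) (pos : Nat) (newitem : Int) : List Int :=
  if h0 : 0 < pos then
    if newitem < h.getD ((pos - 1) / 2) 0 then
      pvSiftdown (h.set pos (h.getD ((pos - 1) / 2) 0)) ((pos - 1) / 2) newitem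
    else h.set pos newitem
  else h.set pos newitem
termination_by pos
decreasing_by omega

def pvHeappush (h : List Int) (v : Int) : List Int := pvSiftdown (h ++ [v]) h.length v

def solution (a : List Int) : Int :=
  match PySem.List.min? a (fun x => x) with
  | none => 0  -- unreachable under Pre_solution: Python's min([]) raises ValueError
  | some m =>
    let idx := (PySem.List.index? a m).getD 0
    let left := PySem.List.slice a none (some (idx : Int))
    let right := (PySem.List.slice a (some ((idx : Int) + 1)) none).reverse
    let s1 := left.foldl (fun (s : List Int × Int) v =>
        let mh := pvHeappush s.1 v
        (mh, if PySem.List.pyGet? mh 0 = some v then s.2 + 1 else s.2)) ([], 1)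
    let s2 := right.foldl (fun (s : List Int × Int) v =>
        let mh := pvHeappush s.1 v
        (mh, if PySem.List.pyGet? mh 0 = some v then s.2 + 1 else s.2)) ([], s1.2)
    s2.2

-- ===== PORT B =====
-- `x <= (optional bound)`, true when the bound is None (Python's `o is None or x <= o`)
def obLe (v : Int) (o : Option Int) : Bool :=
  match o with
  | none => true
  | some c => decide (v ≤ c)

-- running minimum update (Python's `v if cur is None or v < cur else cur`)
def ocomb (pre : Option Int) (v : Int) : Option Int :=
  some (match pre with | none => v | some p => if v < p then v else p)

-- right-to-left pass of Source B: first component = exclusive suffix minima (suf),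
-- second component = running minimum cur of the whole processed suffix
def pvSuf : List Int → List (Option Int) × Option Int
  | [] => ([], none)
  | x :: xs =>
    let p := pvSuf xs
    (p.2 :: p.1, ocomb p.2 x)

def solution_alt (a : List Int) : Int :=
  let suf := (pvSuf a).1
  (((a.zip suf).foldl (fun (s : Option Int × Int) (p : Int × Option Int) =>
      (ocomb s.1 p.1, if obLe p.1 s.1 || obLe p.1 p.2 then s.2 + 1 else s.2))
    (none, 0))).2

-- ===== PRECONDITION & SPEC =====
-- Pre_ excludes only the empty list, on which Python's min(a) raises ValueError
def Pre_solution (a : List Int) : Prop := a ≠ []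
instance (a : List Int) : Decidable (Pre_solution a) := by unfold Pre_solution; infer_instance
def pvWitness_solution : List Int := [2, 1, 3]

-- On the empty list A raises ValueError (min() of an empty sequence) while B returns 0.
def Raises_solution (a : List Int) : Prop := a = []
instance (a : List Int) : Decidable (Raises_solution a) := by unfold Raises_solution; infer_instance
def pvRaiseWitness_solution : List Int := []
def pvRaiseWitnessOut_solution : Int := 0

def Spec_solution (a : List Int) (out : Int) : Prop := out = solution_alt a
instance (a : List Int) (out : Int) : Decidable (Spec_solution a out) := by unfold Spec_solution; infer_instance

-- ===== CLAIM (what is proved, stated in full; the proofs are below) =====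
def Claim_equal_solution : Prop := ∀ (a : List Int), Dom_solution a → Pre_solution a → Spec_solution a (solution a)
def Claim_raises_solution : Prop := (∀ (a : List Int), Dom_solution a → Raises_solution a → ¬ Pre_solution a) ∧ (Dom_solution (pvRaiseWitness_solution) ∧ Raises_solution (pvRaiseWitness_solution) ∧ solution_alt (pvRaiseWitness_solution) = pvRaiseWitnessOut_solution)

-- ===== LEMMAS AND PROOFS =====

-- count of "new (or tied) prefix minima" with running minimum `pre`
def nmc : Option Int → List Int → Int
  | _, [] => 0
  | pre, v :: r => (if obLe v pre then 1 else 0) + nmc (ocomb pre v) r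

-- B-side count: per element, prefix-minimum test OR exclusive-suffix-minimum test
def bcount : Option Int → List Int → Int
  | _, [] => 0
  | pre, v :: r => (if obLe v pre || obLe v (pvSuf r).2 then 1 else 0) + bcount (ocomb pre v) r

def IsHeap (h : List Int) : Prop :=
  ∀ q, 0 < q → q < h.length → h.getD ((q - 1) / 2) 0 ≤ h.getD q 0

-- `cur` is the minimum of the heap contents (none iff empty)
def HMin (h : List Int) (cur : Option Int) : Prop :=
  match cur with
  | none => h = []
  | some c => c ∈ h ∧ ∀ y ∈ h, c ≤ y

lemma getD_set (l : List Int) (i j : Nat) (a : Int) (hi : i < l.length) :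
    (l.set i a).getD j 0 = if j = i then a else l.getD j 0 := by
  rw [List.getD_eq_getElem?_getD, List.getD_eq_getElem?_getD, List.getElem?_set]
  by_cases h : i = j
  · subst h; simp [hi]
  · rw [if_neg h, if_neg (fun hh : j = i => h hh.symm)]

lemma getD_eq_getElem' (t : List Int) (k : Nat) (hk : k < t.length) : t.getD k 0 = t[k] := by
  rw [List.getD_eq_getElem?_getD, List.getElem?_eq_getElem hk]; rfl

lemma mem_of_getD (t : List Int) (k : Nat) (hk : k < t.length) : t.getD k 0 ∈ t := by
  rw [getD_eq_getElem' t k hk]; exact List.getElem_mem hk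

lemma mem_iff_getD (t : List Int) (y : Int) : y ∈ t ↔ ∃ k, k < t.length ∧ t.getD k 0 = y := by
  constructor
  · rw [List.mem_iff_getElem]
    rintro ⟨k, hk, rfl⟩
    exact ⟨k, hk, getD_eq_getElem' t k hk⟩
  · rintro ⟨k, hk, rfl⟩
    exact mem_of_getD t k hk

lemma mem_set_swap (l : List Int) (i j : Nat) (hi : i < l.length) (hj : j < l.length) (y : Int) :
    y ∈ (l.set i (l.getD j 0)).set j (l.getD i 0) ↔ y ∈ l := by
  have hlen : ((l.set i (l.getD j 0)).set j (l.getD i 0)).length = l.length := by simp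
  have hget : ∀ k, ((l.set i (l.getD j 0)).set j (l.getD i 0)).getD k 0 =
      l.getD (if k = j then i else if k = i then j else k) 0 := by
    intro k
    rw [getD_set _ _ _ _ (by simpa using hj), getD_set _ _ _ _ hi]
    split_ifs <;> rfl
  rw [mem_iff_getD, mem_iff_getD]
  constructor
  · rintro ⟨k, hk, rfl⟩
    rw [hget k]
    exact ⟨_, by split_ifs <;> omega, rfl⟩
  · rintro ⟨k, hk, rfl⟩
    refine ⟨if k = i then j else if k = j then i else k, by split_ifs <;> omega, ?_⟩
    rw [hget]
    congr 1
    split_ifs <;> omega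

lemma siftdown_main : ∀ (pos : Nat) (h : List Int) (x : Int), pos < h.length →
    (∀ q, 0 < q → q < h.length → q ≠ pos →
      (h.set pos x).getD ((q - 1) / 2) 0 ≤ (h.set pos x).getD q 0) →
    (0 < pos → ∀ c, 0 < c → c < h.length → (c - 1) / 2 = pos →
      (h.set pos x).getD ((pos - 1) / 2) 0 ≤ (h.set pos x).getD c 0) →
    (pvSiftdown h pos x).length = h.length ∧ IsHeap (pvSiftdown h pos x) ∧
      (∀ y, y ∈ pvSiftdown h pos x ↔ y ∈ h.set pos x) := by
  intro pos
  induction pos using Nat.strong_induction_on with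
  | _ pos IH =>
    intro h x hlen hexc hskip
    have hv : ∀ k, (h.set pos x).getD k 0 = if k = pos then x else h.getD k 0 :=
      fun k => getD_set h pos k x hlen
    rw [pvSiftdown]
    by_cases hp : 0 < pos
    · rw [dif_pos hp]
      set pp := (pos - 1) / 2 with hpp
      have hpplt : pp < pos := by omega
      by_cases hcmp : x < h.getD pp 0
      · rw [if_pos hcmp]
        set h' := h.set pos (h.getD pp 0) with hh'
        have hlen' : h'.length = h.length := by simp [hh']
        have hw : ∀ k, (h'.set pp x).getD k 0 =
            if k = pp then x else if k = pos then h.getD pp 0 else h.getD k 0 := by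
          intro k
          rw [getD_set h' pp k x (by omega), hh', getD_set h pos k _ hlen]
        obtain ⟨L1, L2, L3⟩ := IH pp hpplt h' x (by omega)
          (by -- heap-except invariant for the recursive call
            intro q hq0 hqlen hqpp
            rw [hlen'] at hqlen
            rw [hw, hw, if_neg hqpp]
            by_cases hqpos : q = pos
            · have hqp : (q - 1) / 2 = pp := by omega
              rw [hqp, if_pos rfl, if_pos hqpos]
              omega
            · rw [if_neg hqpos]
              by_cases h1 : (q - 1) / 2 = pp
              · rw [h1, if_pos rfl]
                have := hexc q hq0 hqlen hqpos
                rw [hv, hv, if_neg hqpos, h1, if_neg (show ¬ pp = pos by omega)] at this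
                omega
              · rw [if_neg h1]
                by_cases h2 : (q - 1) / 2 = pos
                · rw [if_pos h2]
                  have := hskip hp q hq0 hqlen h2
                  rw [hv, hv, if_neg hqpos, if_neg (show ¬ pp = pos by omega)] at this
                  exact this
                · rw [if_neg h2]
                  have := hexc q hq0 hqlen hqpos
                  rw [hv, hv, if_neg hqpos, if_neg h2] at this
                  exact this)
          (by -- skip-level invariant for the recursive call
            intro hpp0 c hc0 hclen hcpar
            rw [hlen'] at hclen
            set g := (pp - 1) / 2 with hg
            have hglt : g < pp := by omega
            have hcgt : pp < c := by omega
            have hstep : h.getD g 0 ≤ h.getD pp 0 := by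
              have := hexc pp hpp0 (by omega) (by omega)
              rwa [hv, hv, if_neg (show ¬ pp = pos by omega),
                if_neg (show ¬ g = pos by omega)] at this
            rw [hw, hw, if_neg (show ¬ g = pp by omega),
              if_neg (show ¬ g = pos by omega), if_neg (show ¬ c = pp by omega)]
            by_cases hcpos : c = pos
            · rw [if_pos hcpos]
              exact hstep
            · rw [if_neg hcpos]
              have := hexc c hc0 hclen hcpos
              rw [hv, hv, if_neg hcpos, hcpar, if_neg (show ¬ pp = pos by omega)] at this
              omega)
        refine ⟨by omega, L2, ?_⟩
        intro y
        rw [L3 y]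
        have hswap : h'.set pp x =
            ((h.set pos x).set pos ((h.set pos x).getD pp 0)).set pp ((h.set pos x).getD pos 0) := by
          rw [List.set_set]
          congr 1
          · rw [hv, if_neg (show ¬ pp = pos by omega)]
          · rw [hv, if_pos rfl]
        rw [hswap]
        exact mem_set_swap (h.set pos x) pos pp (by simpa using hlen) (by simp; omega) y
      · rw [if_neg hcmp]
        refine ⟨by simp, ?_, fun y => Iff.rfl⟩
        intro q hq0 hqlen
        rw [List.length_set] at hqlen
        by_cases hqpos : q = pos
        · have hqp : (q - 1) / 2 = pp := by omega
          rw [hv, hv, hqp, if_neg (show ¬ pp = pos by omega), if_pos hqpos]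
          omega
        · exact hexc q hq0 hqlen hqpos
    · rw [dif_neg hp]
      refine ⟨by simp, ?_, fun y => Iff.rfl⟩
      intro q hq0 hqlen
      rw [List.length_set] at hqlen
      exact hexc q hq0 hqlen (by omega)

lemma heappush_main (h : List Int) (v : Int) (hh : IsHeap h) :
    (pvHeappush h v).length = h.length + 1 ∧ IsHeap (pvHeappush h v) ∧
      (∀ y, y ∈ pvHeappush h v ↔ y ∈ h ++ [v]) := by
  have hset : (h ++ [v]).set h.length v = h ++ [v] := by
    rw [List.set_append_right _ _ (le_refl _)]
    simp
  have hgapp : ∀ k, k < h.length → (h ++ [v]).getD k 0 = h.getD k 0 := by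
    intro k hk
    rw [List.getD_eq_getElem?_getD, List.getD_eq_getElem?_getD, List.getElem?_append_left hk]
  obtain ⟨L1, L2, L3⟩ := siftdown_main h.length (h ++ [v]) v (by simp)
    (by
      intro q hq0 hqlen hqne
      rw [hset]
      have hq : q < h.length := by simp at hqlen; omega
      rw [hgapp q hq, hgapp _ (by omega)]
      exact hh q hq0 hq)
    (by
      intro _ c hc0 hclen hcpar
      simp at hclen
      omega)
  rw [hset] at L3
  exact ⟨by simpa using L1, L2, L3⟩

lemma heap_root_le (h : List Int) (hh : IsHeap h) : ∀ q, q < h.length → h.getD 0 0 ≤ h.getD q 0 := by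
  intro q
  induction q using Nat.strong_induction_on with
  | _ q IH =>
    intro hq
    by_cases h0 : q = 0
    · subst h0; exact le_refl _
    · calc h.getD 0 0 ≤ h.getD ((q - 1) / 2) 0 := IH _ (by omega) (by omega)
        _ ≤ h.getD q 0 := hh q (by omega) hq

lemma heap_root_min (h : List Int) (hh : IsHeap h) (y : Int) (hy : y ∈ h) : h.getD 0 0 ≤ y := by
  rw [mem_iff_getD] at hy
  obtain ⟨k, hk, rfl⟩ := hy
  exact heap_root_le h hh k hk

lemma push_step (h : List Int) (cur : Option Int) (v : Int) (hh : IsHeap h) (hm : HMin h cur) :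
    IsHeap (pvHeappush h v) ∧ HMin (pvHeappush h v) (ocomb cur v) ∧
      ((PySem.List.pyGet? (pvHeappush h v) 0 = some v) ↔ obLe v cur = true) := by
  obtain ⟨hl, hhp, hmem⟩ := heappush_main h v hh
  have hPpos : 0 < (pvHeappush h v).length := by omega
  have hroot_mem : (pvHeappush h v).getD 0 0 ∈ pvHeappush h v := mem_of_getD _ 0 hPpos
  have hroot_min : ∀ y ∈ pvHeappush h v, (pvHeappush h v).getD 0 0 ≤ y :=
    fun y hy => heap_root_min _ hhp y hy
  have hgetP : PySem.List.pyGet? (pvHeappush h v) 0 = some ((pvHeappush h v).getD 0 0) := by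
    rw [PySem.List.pyGet?_zero, List.getElem?_eq_getElem hPpos, getD_eq_getElem' _ 0 hPpos]
  have hvmem : v ∈ pvHeappush h v := (hmem v).mpr (by simp)
  refine ⟨hhp, ?_, ?_⟩
  · cases cur with
    | none =>
      simp only [HMin] at hm ⊢
      subst hm
      simp only [ocomb]
      constructor
      · exact (hmem v).mpr (by simp)
      · intro y hy
        have := (hmem y).mp hy
        simp at this
        omega
    | some c =>
      obtain ⟨hcmem, hcmin⟩ := hm
      simp only [HMin, ocomb]
      constructor
      · by_cases hvc : v < c
        · simpa [hvc] using hvmem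
        · have : c ∈ pvHeappush h v := (hmem c).mpr (by simp [hcmem])
          simpa [hvc] using this
      · intro y hy
        have := (hmem y).mp hy
        rw [List.mem_append] at this
        rcases this with hyh | hyv
        · have := hcmin y hyh
          split_ifs <;> omega
        · simp at hyv
          split_ifs <;> omega
  · rw [hgetP, Option.some_inj]
    constructor
    · intro hroot
      cases cur with
      | none => simp [obLe]
      | some c =>
        simp only [obLe, decide_eq_true_eq]
        have : c ∈ pvHeappush h v := (hmem c).mpr (by simp [hm.1])
        have := hroot_min c this
        omega
    · intro hle
      have hvall : ∀ y ∈ h, v ≤ y := by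
        cases cur with
        | none => simp only [HMin] at hm; subst hm; simp
        | some c =>
          simp only [obLe, decide_eq_true_eq] at hle
          exact fun y hy => le_trans hle (hm.2 y hy)
      have h1 : (pvHeappush h v).getD 0 0 ≤ v := hroot_min v hvmem
      have h2 : v ≤ (pvHeappush h v).getD 0 0 := by
        have := (hmem _).mp hroot_mem
        rw [List.mem_append] at this
        rcases this with hrh | hrv
        · exact hvall _ hrh
        · rw [List.mem_singleton] at hrv; omega
      omega

lemma loopA (xs : List Int) : ∀ (h : List Int) (cur : Option Int) (ans : Int),
    IsHeap h → HMin h cur →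
    (xs.foldl (fun (s : List Int × Int) v =>
        let mh := pvHeappush s.1 v
        (mh, if PySem.List.pyGet? mh 0 = some v then s.2 + 1 else s.2)) (h, ans)).2
      = ans + nmc cur xs := by
  induction xs with
  | nil => intro h cur ans _ _; simp [nmc]
  | cons v r ih =>
    intro h cur ans hh hm
    obtain ⟨h1, h2, h3⟩ := push_step h cur v hh hm
    simp only [List.foldl_cons]
    rw [ih _ _ _ h1 h2]
    show _ = ans + ((if obLe v cur then 1 else 0) + nmc (ocomb cur v) r)
    by_cases hc : obLe v cur = true
    · rw [if_pos (h3.mpr hc), if_pos hc]; ring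
    · rw [if_neg (fun hh2 => hc (h3.mp hh2)), if_neg hc]; ring

lemma pvSuf_none (l : List Int) : (pvSuf l).2 = none ↔ l = [] := by
  cases l <;> simp [pvSuf, ocomb]

lemma pvSuf_min : ∀ (l : List Int) (c : Int), (pvSuf l).2 = some c → c ∈ l ∧ ∀ y ∈ l, c ≤ y := by
  intro l
  induction l with
  | nil => intro c hc; simp [pvSuf] at hc
  | cons x xs ih =>
    intro c hc
    simp only [pvSuf] at hc
    cases hx : (pvSuf xs).2 with
    | none =>
      have hxs : xs = [] := (pvSuf_none xs).mp hx
      rw [hx] at hc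
      simp only [ocomb, Option.some_inj] at hc
      subst hxs
      simp [← hc]
    | some d =>
      obtain ⟨hdm, hdmin⟩ := ih d hx
      rw [hx] at hc
      simp only [ocomb, Option.some_inj] at hc
      by_cases hxd : x < d
      · rw [if_pos hxd] at hc
        subst hc
        refine ⟨by simp, ?_⟩
        intro y hy
        rcases List.mem_cons.mp hy with rfl | hy'
        · omega
        · have := hdmin y hy'
          omega
      · rw [if_neg hxd] at hc
        subst hc
        refine ⟨by simp [hdm], ?_⟩
        intro y hy
        rcases List.mem_cons.mp hy with rfl | hy'
        · omega
        · exact hdmin y hy'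

lemma loopB : ∀ (xs : List Int) (pre : Option Int) (ans : Int),
    ((xs.zip (pvSuf xs).1).foldl (fun (s : Option Int × Int) (p : Int × Option Int) =>
        (ocomb s.1 p.1, if obLe p.1 s.1 || obLe p.1 p.2 then s.2 + 1 else s.2))
      (pre, ans)).2 = ans + bcount pre xs := by
  intro xs
  induction xs with
  | nil => intro pre ans; simp [bcount]
  | cons x xs ih =>
    intro pre ans
    have hsuf : (pvSuf (x :: xs)).1 = (pvSuf xs).2 :: (pvSuf xs).1 := by simp [pvSuf]
    rw [hsuf, List.zip_cons_cons, List.foldl_cons, ih]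
    show _ + bcount (ocomb pre x) xs = ans + ((if obLe x pre || obLe x (pvSuf xs).2 then 1 else 0) + bcount (ocomb pre x) xs)
    by_cases hc : (obLe x pre || obLe x (pvSuf xs).2) = true
    · rw [if_pos hc, if_pos hc]; ring
    · rw [if_neg hc, if_neg hc]; ring

lemma foldl_ocomb_some : ∀ (xs : List Int) (p : Int),
    ∃ c, xs.foldl ocomb (some p) = some c ∧ (c = p ∨ c ∈ xs) ∧ c ≤ p ∧ ∀ y ∈ xs, c ≤ y := by
  intro xs
  induction xs with
  | nil => intro p; exact ⟨p, rfl, Or.inl rfl, le_refl _, by simp⟩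
  | cons x xs ih =>
    intro p
    obtain ⟨c, hc, hmem, hle, hall⟩ := ih (if x < p then x else p)
    refine ⟨c, ?_, ?_, ?_, ?_⟩
    · rw [List.foldl_cons]
      show xs.foldl ocomb (ocomb (some p) x) = some c
      simpa [ocomb] using hc
    · rcases hmem with rfl | hc2
      · split_ifs with h
        · exact Or.inr (by simp)
        · exact Or.inl rfl
      · exact Or.inr (List.mem_cons_of_mem _ hc2)
    · split_ifs at hle <;> omega
    · intro y hy
      rcases List.mem_cons.mp hy with rfl | hy'
      · split_ifs at hle <;> omega
      · exact hall y hy'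

lemma foldl_ocomb_none (xs : List Int) (hne : xs ≠ []) :
    ∃ c, xs.foldl ocomb none = some c ∧ c ∈ xs ∧ ∀ y ∈ xs, c ≤ y := by
  cases xs with
  | nil => exact absurd rfl hne
  | cons x r =>
    obtain ⟨c, hc, hmem, hle, hall⟩ := foldl_ocomb_some r x
    refine ⟨c, ?_, ?_, ?_⟩
    · rw [List.foldl_cons]
      show r.foldl ocomb (ocomb none x) = some c
      simpa [ocomb] using hc
    · rcases hmem with rfl | hc2
      · simp
      · exact List.mem_cons_of_mem _ hc2
    · intro y hy
      rcases List.mem_cons.mp hy with rfl | hy'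
      · omega
      · exact hall y hy'

lemma pvSuf_eq_foldl_rev (r : List Int) : (pvSuf r).2 = r.reverse.foldl ocomb none := by
  by_cases hne : r = []
  · subst hne; rfl
  · obtain ⟨c1, hc1⟩ : ∃ c, (pvSuf r).2 = some c := by
      cases h : (pvSuf r).2 with
      | none => exact absurd ((pvSuf_none r).mp h) hne
      | some c => exact ⟨c, rfl⟩
    obtain ⟨hm1, hall1⟩ := pvSuf_min r c1 hc1
    obtain ⟨c2, hc2, hm2, hall2⟩ := foldl_ocomb_none r.reverse (by simpa using hne)
    rw [hc1, hc2, Option.some_inj]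
    have h1 := hall1 c2 (List.mem_reverse.mp hm2)
    have h2 := hall2 c1 (List.mem_reverse.mpr hm1)
    omega

lemma nmc_append : ∀ (xs : List Int) (pre : Option Int) (v : Int),
    nmc pre (xs ++ [v]) = nmc pre xs + (if obLe v (xs.foldl ocomb pre) then 1 else 0) := by
  intro xs
  induction xs with
  | nil => intro pre v; simp [nmc]
  | cons x xs ih =>
    intro pre v
    show (if obLe x pre then 1 else 0) + nmc (ocomb pre x) (xs ++ [v]) = _
    rw [ih]
    show _ = (if obLe x pre then 1 else 0) + nmc (ocomb pre x) xs + _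
    rw [List.foldl_cons]
    ring

lemma bcount_right (m : Int) : ∀ (R : List Int), (∀ x ∈ R, m ≤ x) →
    bcount (some m) R = nmc none R.reverse := by
  intro R
  induction R with
  | nil => intro _; simp [bcount, nmc]
  | cons v r ih =>
    intro hge
    have hmv : m ≤ v := hge v (by simp)
    have hocomb : ocomb (some m) v = some m := by
      simp only [ocomb, Option.some_inj]
      omega
    have hcond : (obLe v (some m) || obLe v (pvSuf r).2) = obLe v (pvSuf r).2 := by
      by_cases hvm : v ≤ m
      · have h2 : obLe v (pvSuf r).2 = true := by
          cases hs : (pvSuf r).2 with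
          | none => simp [obLe]
          | some c =>
            obtain ⟨hcm, _⟩ := pvSuf_min r c hs
            have := hge c (List.mem_cons_of_mem _ hcm)
            simp only [obLe, decide_eq_true_eq]
            omega
        have h1 : obLe v (some m) = true := by simp [obLe, hvm]
        rw [h1, h2]
        rfl
      · have h1 : obLe v (some m) = false := by simp [obLe, hvm]
        rw [h1, Bool.false_or]
    show (if obLe v (some m) || obLe v (pvSuf r).2 then 1 else 0) + bcount (ocomb (some m) v) r = _
    rw [hcond, hocomb, ih (fun x hx => hge x (List.mem_cons_of_mem _ hx))]
    rw [List.reverse_cons, nmc_append, ← pvSuf_eq_foldl_rev]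
    ring

lemma bcount_split (m : Int) (R : List Int) : ∀ (L : List Int) (pre : Option Int),
    (∀ x ∈ L, m < x) → (∀ p, pre = some p → m < p) →
    bcount pre (L ++ m :: R) = nmc pre L + (1 + bcount (some m) R) := by
  intro L
  induction L with
  | nil =>
    intro pre hL hpre
    have hcond : obLe m pre = true := by
      cases pre with
      | none => rfl
      | some p =>
        have := hpre p rfl
        simp only [obLe, decide_eq_true_eq]
        omega
    have hocomb : ocomb pre m = some m := by
      cases pre with
      | none => rfl
      | some p =>
        have := hpre p rfl
        simp only [ocomb, Option.some_inj]
        omega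
    show (if obLe m pre || obLe m (pvSuf R).2 then 1 else 0) + bcount (ocomb pre m) R = _
    rw [hcond, hocomb]
    simp [nmc]
  | cons v L' ih =>
    intro pre hL hpre
    have hmv : m < v := hL v (by simp)
    have hsuf : obLe v (pvSuf (L' ++ m :: R)).2 = false := by
      cases hs : (pvSuf (L' ++ m :: R)).2 with
      | none =>
        have := (pvSuf_none _).mp hs
        simp at this
      | some c =>
        obtain ⟨_, hall⟩ := pvSuf_min _ c hs
        have := hall m (by simp)
        simp only [obLe, decide_eq_false_iff_not]
        omega
    show (if obLe v pre || obLe v (pvSuf (L' ++ m :: R)).2 then 1 else 0)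
        + bcount (ocomb pre v) (L' ++ m :: R) = _
    rw [hsuf, Bool.or_false]
    rw [ih (ocomb pre v) (fun x hx => hL x (List.mem_cons_of_mem _ hx))
      (by
        intro p hp
        simp only [ocomb, Option.some_inj] at hp
        cases pre with
        | none => simp at hp; omega
        | some q =>
          have := hpre q rfl
          simp at hp
          split_ifs at hp <;> omega)]
    show _ = (if obLe v pre then 1 else 0) + nmc (ocomb pre v) L' + (1 + bcount (some m) R)
    ring

lemma isHeap_nil : IsHeap [] := by
  intro q _ hq
  simp at hq

theorem solution_spec : Claim_equal_solution := by
  unfold Claim_equal_solution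
  intro a _ hpre
  unfold Spec_solution
  cases hm : PySem.List.min? a (fun x => x) with
  | none => exact absurd ((PySem.List.min?_eq_none_iff _ _).mp hm) hpre
  | some m =>
    have hmmem : m ∈ a := PySem.List.min?_mem hm
    have hmin : ∀ y ∈ a, m ≤ y := PySem.List.min?_isMin hm
    cases hidx : PySem.List.index? a m with
    | none => exact absurd hmmem ((PySem.List.index?_eq_none_iff _ _).mp hidx)
    | some idx =>
      obtain ⟨pre, suf, hsplit, hlenpre, hnotpre⟩ := (PySem.List.index?_eq_some_iff _ _ _).mp hidx
      have hpre_gt : ∀ x ∈ pre, m < x := by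
        intro x hx
        have h1 : m ≤ x := hmin x (by rw [hsplit]; exact List.mem_append_left _ hx)
        have h2 : x ≠ m := fun he => hnotpre (he ▸ hx)
        omega
      have hsuf_ge : ∀ x ∈ suf, m ≤ x := by
        intro x hx
        exact hmin x (by rw [hsplit]; exact List.mem_append_right _ (List.mem_cons_of_mem _ hx))
      have hleft : PySem.List.slice a none (some ((idx : Nat) : Int)) = pre := by
        rw [PySem.List.slice_to_natCast, hsplit, ← hlenpre, List.take_left]
      have hright : PySem.List.slice a (some ((idx : Int) + 1)) none = suf := by
        have hc : ((idx : Int) + 1) = (((idx + 1 : Nat) : Int)) := by push_cast; ring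
        rw [hc, PySem.List.slice_from_natCast, hsplit,
          show pre ++ m :: suf = (pre ++ [m]) ++ suf by simp,
          show idx + 1 = (pre ++ [m]).length by simp [hlenpre], List.drop_left]
      -- evaluate port A
      have hA : solution a = 1 + nmc none pre + nmc none suf.reverse := by
        unfold solution
        rw [hm]
        simp only [Option.getD_some, hidx]
        rw [hleft, hright]
        rw [loopA _ [] none 1 isHeap_nil rfl, loopA _ [] none _ isHeap_nil rfl]
      -- evaluate port B
      have hB : solution_alt a = 1 + nmc none pre + nmc none suf.reverse := by
        unfold solution_alt
        rw [loopB]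
        rw [hsplit, bcount_split m suf pre none hpre_gt (by intro p hp; simp at hp)]
        rw [bcount_right m suf hsuf_ge]
        ring
      rw [hA, hB]

-- the crash fix made checkable: A raises on [], B returns 0 there (see Raises_solution)
@[simp]
theorem solution_raises : Claim_raises_solution := by
  unfold Claim_raises_solution
  exact ⟨by intro a _ h hp; exact hp h, by decide⟩
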